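-- pv_equiv track=rewrite | github.com/adwipoteka-sys/Tolik | environments/grounded_navigation.py | _trace_positions
-- ===== SOURCE A (Python) =====
-- Action = str
--
-- _COORD = tuple[int, int]
--
-- _DELTAS: dict[Action, tuple[int, int]] = {
--     "up": (0, -1),
--     "down": (0, 1),
--     "left": (-1, 0),
--     "right": (1, 0),
-- }
--
-- def _trace_positions(start: _COORD, actions: list[Action]) -> list[_COORD]:
--     positions = [start]
--     current = start
--     for action in actions:
--         dx, dy = _DELTAS[action]
--         current = (current[0] + dx, current[1] + dy)
--         positions.append(current)
--     return positions
-- ===== SOURCE B (Python) =====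
-- # Per-axis decomposition: two delta lists, two prefix-sum sequences, zipped back into tuples.
-- Action = str
--
-- _COORD = tuple[int, int]
--
-- _DELTAS: dict[Action, tuple[int, int]] = {
--     "up": (0, -1),
--     "down": (0, 1),
--     "left": (-1, 0),
--     "right": (1, 0),
-- }
--
--
-- def _prefix(x0, ds):
--     out = [x0]
--     x = x0
--     for d in ds:
--         x += d
--         out.append(x)
--     return out
--
--
-- def _trace_positions(start: _COORD, actions: list[Action]) -> list[_COORD]:
--     dxs = [_DELTAS[a][0] for a in actions]
--     dys = [_DELTAS[a][1] for a in actions]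
--     return [(x, y) for x, y in zip(_prefix(start[0], dxs), _prefix(start[1], dys))]
-- ===== Notes on version B (the rewrite author's own statement) =====
-- stated objective: alternative
-- what changed: Replaced A's single fused tuple-update loop with a per-axis decomposition: extract dx and dy delta lists, build two independent prefix-sum sequences seeded with the start coordinates, and zip them back into coordinate tuples.
import Mathlib
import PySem

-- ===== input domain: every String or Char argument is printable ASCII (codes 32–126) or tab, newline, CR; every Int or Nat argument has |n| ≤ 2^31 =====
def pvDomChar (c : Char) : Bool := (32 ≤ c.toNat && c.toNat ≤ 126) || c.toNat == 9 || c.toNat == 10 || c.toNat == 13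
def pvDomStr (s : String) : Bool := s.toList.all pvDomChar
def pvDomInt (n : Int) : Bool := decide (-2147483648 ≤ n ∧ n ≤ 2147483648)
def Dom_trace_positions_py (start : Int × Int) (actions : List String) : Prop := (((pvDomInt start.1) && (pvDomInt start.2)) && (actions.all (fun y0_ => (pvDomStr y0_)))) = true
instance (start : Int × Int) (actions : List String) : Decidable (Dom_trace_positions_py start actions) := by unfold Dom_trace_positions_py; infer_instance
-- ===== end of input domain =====

-- B differs from A by decomposition: per-axis delta lists + per-axis prefix sums, zipped back together.

-- ===== PORT A =====
-- _DELTAS[a] (none = KeyError, excluded by Pre_)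
def pyDeltaA? (a : String) : Option (Int × Int) :=
  if a = "up" then some (0, -1)
  else if a = "down" then some (0, 1)
  else if a = "left" then some (-1, 0)
  else if a = "right" then some (1, 0)
  else none

-- the for-loop of A: state = (positions, current)
def traceGoA (positions : List (Int × Int)) (current : Int × Int)
    (actions : List String) : List (Int × Int) :=
  match actions with
  | [] => positions
  | a :: rest =>
    match pyDeltaA? a with
    | none => positions  -- KeyError: unreachable under Pre_
    | some (dx, dy) =>
      let c := (current.1 + dx, current.2 + dy)
      traceGoA (positions ++ [c]) c rest

def trace_positions_py (start : Int × Int) (actions : List String) : List (Int × Int) :=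
  traceGoA [start] start actions

-- ===== PORT B =====
-- B reads the same module-level _DELTAS table: shared lookup helper pyDeltaA?.
-- B's _prefix loop: out = [x0]; for d in ds: x += d; out.append(x)
def prefixGoB (out : List Int) (x : Int) (ds : List Int) : List Int :=
  match ds with
  | [] => out
  | d :: rest => prefixGoB (out ++ [x + d]) (x + d) rest

def pyPrefixB (x0 : Int) (ds : List Int) : List Int := prefixGoB [x0] x0 ds

def trace_positions_py_alt (start : Int × Int) (actions : List String) : List (Int × Int) :=
  let dxs := actions.map (fun a => ((pyDeltaA? a).getD (0, 0)).1)
  let dys := actions.map (fun a => ((pyDeltaA? a).getD (0, 0)).2)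
  List.zip (pyPrefixB start.1 dxs) (pyPrefixB start.2 dys)

-- ===== PRECONDITION & SPEC =====
-- Pre_ excludes exactly the actions on which A raises KeyError (unknown action strings).
def Pre_trace_positions_py (start : Int × Int) (actions : List String) : Prop :=
  ∀ a ∈ actions, a = "up" ∨ a = "down" ∨ a = "left" ∨ a = "right"
instance (start : Int × Int) (actions : List String) : Decidable (Pre_trace_positions_py start actions) := by unfold Pre_trace_positions_py; infer_instance

def pvWitness_trace_positions_py : (Int × Int) × List String :=
  ((2, -3), ["up", "right", "right", "down", "left"])

def Spec_trace_positions_py (start : Int × Int) (actions : List String) (out : List (Int × Int)) : Prop := out = trace_positions_py_alt start actions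
instance (start : Int × Int) (actions : List String) (out : List (Int × Int)) : Decidable (Spec_trace_positions_py start actions out) := by unfold Spec_trace_positions_py; infer_instance

-- ===== CLAIM (what is proved, stated in full; the proofs are below) =====
def Claim_equal_trace_positions_py : Prop := ∀ (start : Int × Int) (actions : List String), Dom_trace_positions_py start actions → Pre_trace_positions_py start actions → Spec_trace_positions_py start actions (trace_positions_py start actions)

-- ===== LEMMAS AND PROOFS =====

-- accumulator laws
theorem traceGoA_append (pos pos' : List (Int × Int)) (c : Int × Int) (acts : List String) :
    traceGoA (pos ++ pos') c acts = pos ++ traceGoA pos' c acts := by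
  induction acts generalizing pos' c with
  | nil => simp [traceGoA]
  | cons a rest ih =>
    simp only [traceGoA]
    cases h : pyDeltaA? a with
    | none => rfl
    | some p =>
      obtain ⟨dx, dy⟩ := p
      simpa using ih (pos' ++ [(c.1 + dx, c.2 + dy)]) (c.1 + dx, c.2 + dy)

theorem prefixGoB_append (out out' : List Int) (x : Int) (ds : List Int) :
    prefixGoB (out ++ out') x ds = out ++ prefixGoB out' x ds := by
  induction ds generalizing out' x with
  | nil => simp [prefixGoB]
  | cons d rest ih =>
    simp only [prefixGoB]
    simpa using ih (out' ++ [x + d]) (x + d)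

-- main induction: under Pre_, A's fused trace equals the zip of B's two prefix sums
theorem trace_zip (c : Int × Int) (acts : List String)
    (h : ∀ a ∈ acts, a = "up" ∨ a = "down" ∨ a = "left" ∨ a = "right") :
    traceGoA [c] c acts =
      List.zip (pyPrefixB c.1 (acts.map (fun a => ((pyDeltaA? a).getD (0, 0)).1)))
               (pyPrefixB c.2 (acts.map (fun a => ((pyDeltaA? a).getD (0, 0)).2))) := by
  induction acts generalizing c with
  | nil => simp [traceGoA, pyPrefixB, prefixGoB]
  | cons a rest ih =>
    have ha := h a (by simp)
    have hrest : ∀ b ∈ rest, b = "up" ∨ b = "down" ∨ b = "left" ∨ b = "right" :=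
      fun b hb => h b (by simp [hb])
    obtain ⟨dx, dy, hd⟩ : ∃ dx dy, pyDeltaA? a = some (dx, dy) ∧ pyDeltaA? a = some (dx, dy) := by
      rcases ha with h | h | h | h <;> subst h <;> exact ⟨_, _, rfl, rfl⟩
    simp only [traceGoA, hd.1, hd.2, List.map_cons, pyPrefixB, prefixGoB, Option.getD_some]
    rw [traceGoA_append [c] [(c.1 + dx, c.2 + dy)],
        prefixGoB_append [c.1] [c.1 + dx], prefixGoB_append [c.2] [c.2 + dy]]
    have := ih (c.1 + dx, c.2 + dy) hrest
    simp only [pyPrefixB] at this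
    simp [List.zip, this]

-- ===== VERDICT (by name: the statement is the Claim_ definition above) =====
theorem trace_positions_py_spec : Claim_equal_trace_positions_py := by
  intro start actions _ hpre
  unfold Spec_trace_positions_py trace_positions_py trace_positions_py_alt
  exact trace_zip start actions hpre
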